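-- pv_equiv track=rewrite | github.com/cahlen/idontknow | scripts/experiments/kronecker-coefficients/char_table.py | z_rho
-- ===== SOURCE A (Python) =====
-- def z_rho(rho):
--     """Centralizer order for cycle type rho."""
--     from collections import Counter
--     c = Counter(rho)
--     z = 1
--     for i, m in c.items():
--         z *= i ** m
--         for j in range(2, m + 1):
--             z *= j
--     return z
-- ===== SOURCE B (Python) =====
-- def z_rho(rho):
--     """Centralizer order for cycle type rho."""
--     z = 1
--     seen = {}
--     for i in rho:
--         c = seen.get(i, 0) + 1
--         seen[i] = c
--         z *= i * c
--     return z
-- ===== Notes on version B (the rewrite author's own statement) =====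
-- stated objective: simpler
-- what changed: Replaces the Counter pass plus a nested factorial loop per distinct part with one flat pass over rho that keeps a running multiplicity per value and multiplies the accumulator by i*c incrementally, building each factor i^m * m! as i*1, i*2, ..., i*m.
import Mathlib
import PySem

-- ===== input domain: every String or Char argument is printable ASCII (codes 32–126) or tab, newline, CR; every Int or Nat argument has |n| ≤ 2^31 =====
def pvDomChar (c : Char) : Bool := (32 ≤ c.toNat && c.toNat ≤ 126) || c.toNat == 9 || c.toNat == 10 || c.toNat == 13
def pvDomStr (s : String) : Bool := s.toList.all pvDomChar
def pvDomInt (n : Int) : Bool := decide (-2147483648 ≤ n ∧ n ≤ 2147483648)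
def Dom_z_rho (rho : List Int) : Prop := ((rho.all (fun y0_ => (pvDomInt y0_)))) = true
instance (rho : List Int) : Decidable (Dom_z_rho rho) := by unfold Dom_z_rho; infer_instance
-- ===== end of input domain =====

-- B replaces A's Counter + nested factorial loop by one flat pass with running counts; same values, same O(n) cost.

-- ===== PORT A =====
-- Counter(rho) is PySem.Dict.counter; 'i ** m' is i ^ m.toNat (counter values are ≥ 1, so no negative exponent is reachable);
-- 'range(2, m+1)' is PySem.List.pyRange 2 (m+1) 1.
def z_rho (rho : List Int) : Int :=
  (PySem.Dict.counter rho).items.foldl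
    (fun z p =>
      (PySem.List.pyRange 2 (p.2 + 1) 1).foldl (fun z j => z * j) (z * p.1 ^ p.2.toNat))
    1

-- ===== PORT B =====
-- one pass: state = (accumulator z, dict 'seen' of running counts)
def z_rho_alt (rho : List Int) : Int :=
  (rho.foldl
    (fun (st : Int × PySem.Dict Int Int) i =>
      let c := st.2.getD i 0 + 1
      (st.1 * (i * c), st.2.insert i c))
    (1, PySem.Dict.empty)).1

-- ===== PRECONDITION & SPEC =====
def Spec_z_rho (rho : List Int) (out : Int) : Prop := out = z_rho_alt rho
instance (rho : List Int) (out : Int) : Decidable (Spec_z_rho rho out) := by unfold Spec_z_rho; infer_instance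

-- ===== CLAIM (what is proved, stated in full; the proofs are below) =====
def Claim_equal_z_rho : Prop := ∀ (rho : List Int), Dom_z_rho rho → Spec_z_rho rho (z_rho rho)

-- ===== LEMMAS AND PROOFS =====

-- foldl with multiplication is z0 * product
theorem pv_foldl_mul (l : List Int) (z : Int) :
    l.foldl (fun z j => z * j) z = z * l.prod := by
  induction l generalizing z with
  | nil => simp
  | cons a l ih => simp [ih, mul_assoc]

-- the factor A contributes for a distinct part k of multiplicity m
def pvF (k m : Int) : Int := k ^ m.toNat * (PySem.List.pyRange 2 (m + 1) 1).prod

theorem pv_foldl_mul_map (l : List Int) (h : Int → Int) (z : Int) :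
    l.foldl (fun z k => z * h k) z = z * (l.map h).prod := by
  induction l generalizing z with
  | nil => simp
  | cons a l ih => simp [ih, mul_assoc]

theorem pv_A_eq (rho : List Int) :
    z_rho rho = ((PySem.Set.ofList rho).map (fun k => pvF k (rho.count k))).prod := by
  unfold z_rho
  rw [PySem.Dict.items_counter, List.foldl_map]
  have : ∀ (z : Int) (k : Int),
      (PySem.List.pyRange 2 ((rho.count k : Int) + 1) 1).foldl (fun z j => z * j)
        (z * k ^ (rho.count k : Int).toNat)
      = z * pvF k (rho.count k) := by
    intro z k
    rw [pv_foldl_mul, pvF, mul_assoc]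
  calc ((PySem.Set.ofList rho).foldl
          (fun z k => (PySem.List.pyRange 2 ((rho.count k : Int) + 1) 1).foldl
            (fun z j => z * j) (z * k ^ (rho.count k : Int).toNat)) 1)
      = (PySem.Set.ofList rho).foldl (fun z k => z * pvF k (rho.count k)) 1 := by
        apply PySem.List.foldl_congr_mem; intro z k _; exact this z k
    _ = _ := by rw [pv_foldl_mul_map]; ring

-- B's dict component is the running counter
theorem pv_B_snd (rho : List Int) (z : Int) (d : PySem.Dict Int Int) :
    (rho.foldl
      (fun (st : Int × PySem.Dict Int Int) i =>
        let c := st.2.getD i 0 + 1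
        (st.1 * (i * c), st.2.insert i c)) (z, d)).2
    = rho.foldl (fun d i => d.insert i (d.getD i 0 + 1)) d := by
  induction rho generalizing z d with
  | nil => rfl
  | cons a l ih => simpa using ih (z * (a * (d.getD a 0 + 1))) (d.insert a (d.getD a 0 + 1))

theorem pv_B_append (xs : List Int) (x : Int) :
    z_rho_alt (xs ++ [x]) = z_rho_alt xs * (x * ((xs.count x : Int) + 1)) := by
  unfold z_rho_alt
  rw [List.foldl_append]
  simp only [List.foldl_cons, List.foldl_nil]
  rw [pv_B_snd, PySem.Dict.foldl_insert_getD_add_one_eq_counter, PySem.Dict.getD_counter]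

-- replace the value of one map entry on a nodup list: multiply the product by the factor's ratio
theorem pv_prod_map_update (l : List Int) (hnd : l.Nodup) (x : Int) (hx : x ∈ l)
    (f g : Int → Int) (hfg : ∀ k ∈ l, k ≠ x → f k = g k) (c : Int) (hgx : g x = f x * c) :
    (l.map g).prod = (l.map f).prod * c := by
  induction l with
  | nil => cases hx
  | cons a l ih =>
    rcases List.nodup_cons.mp hnd with ⟨hal, hl⟩
    by_cases hax : a = x
    · subst hax
      have hcong : l.map g = l.map f := by
        apply List.map_congr_left
        intro k hk
        exact (hfg k (List.mem_cons_of_mem _ hk) (fun h => hal (h ▸ hk))).symm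
      simp only [List.map_cons, List.prod_cons, hcong, hgx]
      ring
    · have hx' : x ∈ l := by
        rcases List.mem_cons.mp hx with h | h
        · exact absurd h.symm hax
        · exact h
      have := ih hl hx' (fun k hk hkx => hfg k (List.mem_cons_of_mem _ hk) hkx)
      simp only [List.map_cons, List.prod_cons, this,
        hfg a (List.mem_cons_self) hax]
      ring

theorem pv_count_append_ne (xs : List Int) (x k : Int) (h : k ≠ x) :
    (xs ++ [x]).count k = xs.count k := by
  simp [List.count_append, h.symm]

theorem pv_main (rho : List Int) : z_rho rho = z_rho_alt rho := by
  induction rho using List.reverseRecOn with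
  | nil => rfl
  | append_singleton xs x ih =>
    rw [pv_B_append, ← ih, pv_A_eq, pv_A_eq]
    by_cases hx : x ∈ xs
    · -- x already occurs: same distinct set, only x's factor changes
      have hset : PySem.Set.ofList (xs ++ [x]) = PySem.Set.ofList xs := by
        rw [PySem.Set.ofList_append_singleton,
          PySem.Set.add_of_mem ((PySem.Set.mem_ofList _ _).mpr hx)]
      rw [hset]
      have hm : 1 ≤ xs.count x := List.count_pos_iff.mpr hx
      apply pv_prod_map_update (PySem.Set.ofList xs) (PySem.Set.nodup_ofList xs) x
        ((PySem.Set.mem_ofList _ _).mpr hx)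
      · intro k _ hkx
        rw [pv_count_append_ne xs x k hkx]
      · -- pvF x (m+1) = pvF x m * (x * (m+1))
        have hcnt : ((xs ++ [x]).count x : Int) = (xs.count x : Int) + 1 := by
          simp [List.count_append]
        rw [hcnt]
        unfold pvF
        have h1 : ((xs.count x : Int) + 1).toNat = (xs.count x : Int).toNat + 1 := by omega
        have h2 : PySem.List.pyRange 2 ((xs.count x : Int) + 1 + 1) 1
            = PySem.List.pyRange 2 ((xs.count x : Int) + 1) 1 ++ [(xs.count x : Int) + 1] := by
          have : (2 : Int) ≤ (xs.count x : Int) + 1 := by omega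
          exact PySem.List.pyRange_one_succ_right this
        rw [h1, h2, pow_succ, List.prod_append]
        simp
        ring
    · -- x is new: the distinct set gains x at the end, with factor x^1 * 1! = x
      have hset : PySem.Set.ofList (xs ++ [x]) = PySem.Set.ofList xs ++ [x] := by
        rw [PySem.Set.ofList_append_singleton,
          PySem.Set.add_of_not_mem (fun h => hx ((PySem.Set.mem_ofList _ _).mp h))]
      rw [hset, List.map_append, List.prod_append]
      have hcong : (PySem.Set.ofList xs).map (fun k => pvF k ((xs ++ [x]).count k))
          = (PySem.Set.ofList xs).map (fun k => pvF k (xs.count k)) := by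
        apply List.map_congr_left
        intro k hk
        have hkx : k ≠ x := fun h => hx (h ▸ (PySem.Set.mem_ofList _ _).mp hk)
        rw [pv_count_append_ne xs x k hkx]
      have hxcnt : ((xs ++ [x]).count x : Int) = 1 := by
        simp [List.count_append, List.count_eq_zero_of_not_mem hx]
      rw [hcong]
      simp only [List.map_cons, List.map_nil, List.prod_cons, List.prod_nil, hxcnt]
      have : pvF x 1 = x := by
        unfold pvF
        norm_num [PySem.List.pyRange_one_eq_nil]
      rw [this, List.count_eq_zero_of_not_mem hx]
      norm_num

-- ===== VERDICT (by name: the statement is the Claim_ definition above) =====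
theorem z_rho_spec : Claim_equal_z_rho := by
  intro rho _
  unfold Spec_z_rho
  exact pv_main rho
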